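-- pv_equiv track=rewrite | github.com/DarkMattrMaestro/MusicManager | player (old2).py | is_valid_playlist_folder
-- ===== SOURCE A (Python) =====
-- IGNORED_FOLDERS = ['download']
--
-- ALLOWED_AUDIO_FORMATS = ['wav', 'm4a', 'mp3', 'aac', 'flac', 'ogg']
--
-- def is_valid_playlist_folder(folder: str):
--     """Return whether or not the given folder/file is a
--     valid playlist/song.
--     """
--     if (folder[0] == '.'): return False
--     if (folder in IGNORED_FOLDERS): return False
--
--     correct_format = False
--     for format in ALLOWED_AUDIO_FORMATS:
--         if folder.endswith('.' + format):
--             correct_format = True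
--     if (not correct_format) and ('.' in folder): return False
--
--     return True
-- ===== SOURCE B (Python) =====
-- IGNORED_FOLDERS = ['download']
--
-- ALLOWED_AUDIO_FORMATS = ['wav', 'm4a', 'mp3', 'aac', 'flac', 'ogg']
--
-- def is_valid_playlist_folder(folder: str):
--     """Return whether or not the given folder/file is a
--     valid playlist/song.
--     """
--     if (folder[0] == '.'): return False
--     if (folder in IGNORED_FOLDERS): return False
--
--     # single backward scan: collect the extension after the last '.' (if any)
--     buf = []
--     for ch in reversed(folder):
--         if ch == '.':
--             return ''.join(reversed(buf)) in ALLOWED_AUDIO_FORMATS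
--         buf.append(ch)
--     return True
-- ===== Notes on version B (the rewrite author's own statement) =====
-- stated objective: alternative
-- what changed: Instead of testing endswith against every allowed format, B scans the name once from the end, extracts the extension after the last dot and does one membership test (no dot means valid).
-- outside the precondition, e.g. on is_valid_playlist_folder(''): A raises IndexError, B raises IndexError
import Mathlib
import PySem

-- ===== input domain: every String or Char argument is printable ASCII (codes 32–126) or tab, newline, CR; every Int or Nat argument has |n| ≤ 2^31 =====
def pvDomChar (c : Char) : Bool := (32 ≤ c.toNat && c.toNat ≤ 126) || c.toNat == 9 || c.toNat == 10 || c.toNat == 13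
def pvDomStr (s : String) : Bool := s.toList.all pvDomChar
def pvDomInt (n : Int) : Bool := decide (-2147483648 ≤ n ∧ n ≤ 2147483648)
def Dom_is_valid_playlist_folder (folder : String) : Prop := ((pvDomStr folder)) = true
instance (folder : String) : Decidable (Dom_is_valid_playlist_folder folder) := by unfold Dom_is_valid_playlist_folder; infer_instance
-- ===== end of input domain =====

-- B replaces the per-format endswith scan by one backward scan that extracts the
-- extension after the last '.' and does a single membership test (alternative).

def pvIgnoredFolders : List (List Char) := ["download".toList]

def pvAllowedFormats : List (List Char) :=
  ["wav".toList, "m4a".toList, "mp3".toList, "aac".toList, "flac".toList, "ogg".toList]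

-- ===== PORT A =====
def is_valid_playlist_folder (folder : String) : Bool :=
  let cs := folder.toList
  if PySem.List.pyGet? cs 0 == some '.' then false
  else if pvIgnoredFolders.contains cs then false
  else
    let correct := pvAllowedFormats.foldl
      (fun acc format => if PySem.Chars.endswith cs ('.' :: format) then true else acc) false
    if !correct && PySem.Chars.isIn ['.'] cs then false else true

-- ===== PORT B =====
-- the 'for ch in reversed(folder)' loop of Source B: buf accumulates, early return at '.'
def pvExtLoop (buf : List Char) : List Char → Bool
  | [] => true
  | ch :: rest =>
      if ch = '.' then pvAllowedFormats.contains buf.reverse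
      else pvExtLoop (buf ++ [ch]) rest

def is_valid_playlist_folder_alt (folder : String) : Bool :=
  let cs := folder.toList
  if PySem.List.pyGet? cs 0 == some '.' then false
  else if pvIgnoredFolders.contains cs then false
  else pvExtLoop [] cs.reverse

-- ===== PRECONDITION & SPEC =====
-- Pre_ excludes only the empty string, on which A raises IndexError at folder[0].
def Pre_is_valid_playlist_folder (folder : String) : Prop := folder ≠ ""
instance (folder : String) : Decidable (Pre_is_valid_playlist_folder folder) := by
  unfold Pre_is_valid_playlist_folder; infer_instance

def pvWitness_is_valid_playlist_folder : String := "song.mp3"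

def Spec_is_valid_playlist_folder (folder : String) (out : Bool) : Prop :=
  out = is_valid_playlist_folder_alt folder
instance (folder : String) (out : Bool) : Decidable (Spec_is_valid_playlist_folder folder out) := by
  unfold Spec_is_valid_playlist_folder; infer_instance

-- ===== CLAIM (what is proved, stated in full; the proofs are below) =====
def Claim_equal_is_valid_playlist_folder : Prop :=
  ∀ (folder : String), Dom_is_valid_playlist_folder folder →
    Pre_is_valid_playlist_folder folder →
    Spec_is_valid_playlist_folder folder (is_valid_playlist_folder folder)

-- ===== LEMMAS AND PROOFS =====

-- A's accumulator loop over the formats is an 'any'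
theorem pv_foldl_if_any {α : Type} (p : α → Bool) (l : List α) (b : Bool) :
    l.foldl (fun acc x => if p x then true else acc) b = (b || l.any p) := by
  induction l generalizing b with
  | nil => simp
  | cons x xs ih =>
      simp only [List.foldl_cons, List.any_cons, ih]
      cases hx : p x <;> simp

theorem pv_takeWhile_no_dot (p t : List Char) (hp : '.' ∉ p) :
    (p ++ '.' :: t).takeWhile (fun c => !(c == '.')) = p := by
  induction p with
  | nil => simp
  | cons c cs ih =>
      have hc : c ≠ '.' := fun h => hp (h ▸ List.mem_cons_self)
      have hcs : '.' ∉ cs := fun h => hp (List.mem_cons_of_mem _ h)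
      simp [hc, ih hcs]

theorem pv_suffix_iff (r p : List Char) (hp : '.' ∉ p) :
    (p ++ ['.'] <+: r) ↔ ('.' ∈ r ∧ r.takeWhile (fun c => !(c == '.')) = p) := by
  constructor
  · rintro ⟨t, rfl⟩
    refine ⟨by simp, ?_⟩
    have h : p ++ ['.'] ++ t = p ++ '.' :: t := by simp
    rw [h, pv_takeWhile_no_dot p t hp]
  · rintro ⟨hmem, htw⟩
    have hd : r.dropWhile (fun c => !(c == '.')) ≠ [] := by
      intro h
      have := List.dropWhile_eq_nil_iff.mp h '.' hmem
      simp at this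
    obtain ⟨c, d, hcd⟩ := List.exists_cons_of_ne_nil hd
    have hc : c = '.' := by
      have h2 := List.head_dropWhile_not (l := r) (p := fun c => !(c == '.')) hd
      simp only [hcd, List.head_cons] at h2
      simpa using h2
    refine ⟨d, ?_⟩
    have h3 := List.takeWhile_append_dropWhile (p := fun c => !(c == '.')) (l := r)
    rw [htw, hcd, hc] at h3
    simp [← h3]

theorem pv_extLoop_spec (buf r : List Char) :
    pvExtLoop buf r =
      if '.' ∈ r then
        pvAllowedFormats.contains ((buf ++ r.takeWhile (fun c => !(c == '.'))).reverse)
      else true := by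
  induction r generalizing buf with
  | nil => simp [pvExtLoop]
  | cons ch rest ih =>
      by_cases hch : ch = '.'
      · subst hch
        simp [pvExtLoop]
      · have hmemiff : ('.' ∈ ch :: rest) ↔ ('.' ∈ rest) := by
          constructor
          · intro h
            rcases List.mem_cons.mp h with h | h
            · exact absurd h.symm hch
            · exact h
          · exact fun h => List.mem_cons_of_mem _ h
        have htw : (ch :: rest).takeWhile (fun c => !(c == '.'))
            = ch :: rest.takeWhile (fun c => !(c == '.')) := by
          simp [hch]
        simp only [pvExtLoop, if_neg hch, ih, htw]
        by_cases hm : '.' ∈ rest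
        · rw [if_pos hm, if_pos (hmemiff.mpr hm)]
          congr 1
          simp
        · rw [if_neg hm, if_neg (fun h => hm (hmemiff.mp h))]

theorem pv_no_dot_formats : ∀ fmt ∈ pvAllowedFormats, '.' ∉ fmt := by decide

-- characterisation of one endswith test: the reversed name starts with fmt.reverse then '.'
theorem pv_endswith_char (cs fmt : List Char) (hp : '.' ∉ fmt) :
    PySem.Chars.endswith cs ('.' :: fmt) = true ↔
      ('.' ∈ cs ∧ cs.reverse.takeWhile (fun c => !(c == '.')) = fmt.reverse) := by
  rw [PySem.Chars.endswith_iff, ← List.reverse_prefix, List.reverse_cons,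
      pv_suffix_iff cs.reverse fmt.reverse (by simpa using hp)]
  simp

-- the two tails agree once the shared guards have passed
theorem pv_tail_eq (cs : List Char) :
    (if !(pvAllowedFormats.foldl
          (fun acc format => if PySem.Chars.endswith cs ('.' :: format) then true else acc) false)
        && PySem.Chars.isIn ['.'] cs then false else true)
      = pvExtLoop [] cs.reverse := by
  rw [pv_foldl_if_any, pv_extLoop_spec]
  simp only [Bool.false_or, List.nil_append, List.mem_reverse]
  by_cases hmem : '.' ∈ cs
  · have hisin : PySem.Chars.isIn ['.'] cs = true := by
      rw [PySem.Chars.isIn_iff_infix]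
      obtain ⟨s, t, rfl⟩ := List.append_of_mem hmem
      exact ⟨s, t, by simp⟩
    rw [if_pos hmem, hisin]
    set e := cs.reverse.takeWhile (fun c => !(c == '.')) with he
    have hedot : '.' ∉ e := by
      intro h
      have := List.mem_takeWhile_imp h
      simp at this
    cases hany : pvAllowedFormats.any (fun format => PySem.Chars.endswith cs ('.' :: format)) with
    | false =>
        have hne : e.reverse ∉ pvAllowedFormats := by
          intro hmemf
          have hend : PySem.Chars.endswith cs ('.' :: e.reverse) = true := by
            rw [pv_endswith_char cs e.reverse (by simpa using hedot)]
            exact ⟨hmem, by simp [he]⟩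
          have := List.any_eq_false.mp hany _ hmemf
          simp [hend] at this
        simp [hne]
    | true =>
        obtain ⟨fmt, hf, hend⟩ := List.any_eq_true.mp hany
        have hchar := (pv_endswith_char cs fmt (pv_no_dot_formats fmt hf)).mp hend
        have h2 : e = fmt.reverse := hchar.2
        have hfe : fmt = e.reverse := by rw [h2, List.reverse_reverse]
        rw [hfe] at hf
        simpa using hf
  · have hisin : PySem.Chars.isIn ['.'] cs = false := by
      rw [PySem.Chars.isIn_eq_false_iff]
      intro h
      exact hmem (h.subset (by simp))
    rw [if_neg hmem, hisin]
    simp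

-- ===== VERDICT (by name: the statement is the Claim_ definition above) =====
theorem is_valid_playlist_folder_spec : Claim_equal_is_valid_playlist_folder := by
  intro folder _ _
  unfold Spec_is_valid_playlist_folder is_valid_playlist_folder is_valid_playlist_folder_alt
  by_cases h1 : (PySem.List.pyGet? folder.toList 0 == some '.') = true
  · simp only [h1, if_true]
  · by_cases h2 : pvIgnoredFolders.contains folder.toList = true
    · simp only [h1, h2, Bool.false_eq_true, if_true, if_false]
    · simp only [h1, h2, Bool.false_eq_true, if_false]
      exact pv_tail_eq folder.toList
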